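-- pv_equiv track=rewrite | github.com/yangeric7/AdventOfCode2018 | solutions/day2/day2.py | part1
-- ===== SOURCE A (Python) =====
-- def part1(id_list):
--     exactly_two = 0
--     exactly_three = 0
--
--     for id in id_list:
--         two, three = find_count(id)
--         exactly_two += two
--         exactly_three += three
--
--     return exactly_two * exactly_three
--
-- def find_count(id):
--     seen = {}
--     exactly_two = False
--     exactly_three = False
--     for character in id:
--         if character in seen:
--             seen[character] += 1
--         else:
--             seen[character] = 1
--
--     for _, value in seen.items():
--         if value == 2:
--             exactly_two = True
--         elif value == 3:
--             exactly_three = True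
--
--     return exactly_two, exactly_three
-- ===== SOURCE B (Python) =====
-- def part1(id_list):
--     def has_exact(s, k):
--         return any(sum(1 for d in s if d == c) == k for c in s)
--     twos = sum(1 for s in id_list if has_exact(s, 2))
--     threes = sum(1 for s in id_list if has_exact(s, 3))
--     return twos * threes
-- ===== Notes on version B (the rewrite author's own statement) =====
-- stated objective: alternative
-- what changed: Replaces the per-ID frequency dictionary plus value scan with a direct any(count(c)==k) character scan, and replaces the single two-accumulator loop over id_list with two independent counting passes multiplied at the end.
import Mathlib
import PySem

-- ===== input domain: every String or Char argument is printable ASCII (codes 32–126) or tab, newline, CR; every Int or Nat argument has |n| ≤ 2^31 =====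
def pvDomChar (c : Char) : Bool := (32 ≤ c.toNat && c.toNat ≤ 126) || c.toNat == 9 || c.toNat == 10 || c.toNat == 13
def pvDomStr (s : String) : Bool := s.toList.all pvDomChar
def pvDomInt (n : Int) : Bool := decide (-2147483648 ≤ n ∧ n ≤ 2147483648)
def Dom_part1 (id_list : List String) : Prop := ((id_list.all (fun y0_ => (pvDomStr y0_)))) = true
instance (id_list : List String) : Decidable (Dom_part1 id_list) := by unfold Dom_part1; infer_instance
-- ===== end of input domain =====

-- B replaces A's per-ID frequency dictionary (and its value scan) by a direct
-- any(count(c)==k) scan over the ID's characters, and A's single two-accumulator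
-- loop over id_list by two independent counting passes; return values are equal.

-- ===== PORT A =====
-- find_count: build the character-frequency dict, then scan its values for 2 / 3
def findCount (id : String) : Bool × Bool :=
  let seen : PySem.Dict Char Int :=
    id.toList.foldl
      (fun d c => if d.contains c then d.insert c (d.getD c 0 + 1) else d.insert c 1)
      PySem.Dict.empty
  seen.items.foldl
    (fun (p : Bool × Bool) kv =>
      if kv.2 = 2 then (true, p.2) else if kv.2 = 3 then (p.1, true) else p)
    (false, false)

def part1 (id_list : List String) : Int :=
  let p : Int × Int :=
    id_list.foldl
      (fun (acc : Int × Int) id =>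
        let tt := findCount id
        (acc.1 + (if tt.1 then 1 else 0), acc.2 + (if tt.2 then 1 else 0)))
      (0, 0)
  p.1 * p.2

-- ===== PORT B =====
-- has_exact(s, k): some character of s occurs exactly k times in s
def hasExact (s : String) (k : Int) : Bool :=
  s.toList.any (fun c => ((s.toList.count c : Int) == k))

def part1_alt (id_list : List String) : Int :=
  ((id_list.countP (fun s => hasExact s 2) : Nat) : Int) *
  ((id_list.countP (fun s => hasExact s 3) : Nat) : Int)

-- ===== PRECONDITION & SPEC =====
def Spec_part1 (id_list : List String) (out : Int) : Prop := out = part1_alt id_list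
instance (id_list : List String) (out : Int) : Decidable (Spec_part1 id_list out) := by unfold Spec_part1; infer_instance

-- ===== CLAIM (what is proved, stated in full; the proofs are below) =====
def Claim_equal_part1 : Prop := ∀ (id_list : List String), Dom_part1 id_list → Spec_part1 id_list (part1 id_list)

-- ===== LEMMAS AND PROOFS =====

-- A's dict-building loop is the Counter loop
theorem findCount_fold_eq_counter (cs : List Char) :
    cs.foldl
      (fun (d : PySem.Dict Char Int) c =>
        if d.contains c then d.insert c (d.getD c 0 + 1) else d.insert c 1)
      PySem.Dict.empty = PySem.Dict.counter cs := by
  have hstep :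
      (fun (d : PySem.Dict Char Int) c =>
        if d.contains c then d.insert c (d.getD c 0 + 1) else d.insert c 1) =
      (fun (d : PySem.Dict Char Int) c => d.insert c (d.getD c 0 + 1)) := by
    funext d c
    by_cases h : d.contains c = true
    · simp [h]
    · have hf : d.contains c = false := by simpa using h
      have h0 : d.getD c 0 = 0 := PySem.Dict.getD_of_not_contains d 0 hf
      simp [hf, h0]
  rw [hstep, PySem.Dict.foldl_insert_getD_add_one_eq_counter]

-- A's value-scan loop computes the two "some value equals k" flags
theorem flag_fold (l : List (Char × Int)) (a b : Bool) :
    l.foldl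
      (fun (p : Bool × Bool) kv =>
        if kv.2 = 2 then (true, p.2) else if kv.2 = 3 then (p.1, true) else p)
      (a, b) =
    (a || l.any (fun kv => kv.2 == 2), b || l.any (fun kv => kv.2 == 3)) := by
  induction l generalizing a b with
  | nil => simp
  | cons kv t ih =>
    by_cases h2 : kv.2 = 2
    · simp [h2, ih]
    · by_cases h3 : kv.2 = 3
      · simp [h3, ih]
      · have e2 : (kv.2 == 2) = false := by simp [h2]
        have e3 : (kv.2 == 3) = false := by simp [h3]
        simp [h2, h3, ih, e2, e3]

-- `any` over the distinct elements equals `any` over the list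
theorem any_ofList {α : Type} [BEq α] [LawfulBEq α] (xs : List α) (p : α → Bool) :
    (PySem.Set.ofList xs).any p = xs.any p := by
  rw [Bool.eq_iff_iff, List.any_eq_true, List.any_eq_true]
  constructor <;> rintro ⟨x, hx, hp⟩
  · exact ⟨x, (PySem.Set.mem_ofList xs x).mp hx, hp⟩
  · exact ⟨x, (PySem.Set.mem_ofList xs x).mpr hx, hp⟩

-- per-ID equivalence of the flags
theorem findCount_eq (id : String) :
    findCount id = (hasExact id 2, hasExact id 3) := by
  simp only [findCount, findCount_fold_eq_counter, PySem.Dict.items_counter, flag_fold,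
    Bool.false_or, List.any_map]
  unfold hasExact
  rw [any_ofList, any_ofList]
  rfl

-- A's outer loop with two running sums is the pair of counts
theorem outer_fold (l : List String) (a b : Int) :
    l.foldl
      (fun (acc : Int × Int) id =>
        let tt := findCount id
        (acc.1 + (if tt.1 then 1 else 0), acc.2 + (if tt.2 then 1 else 0)))
      (a, b) =
    (a + ((l.countP (fun s => hasExact s 2) : Nat) : Int),
     b + ((l.countP (fun s => hasExact s 3) : Nat) : Int)) := by
  induction l generalizing a b with
  | nil => simp
  | cons u t ih =>
    simp only [List.foldl_cons]
    rw [ih]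
    simp only [findCount_eq, List.countP_cons, Prod.mk.injEq]
    constructor <;> split <;> push_cast <;> ring

-- ===== VERDICT (by name: the statement is the Claim_ definition above) =====
theorem part1_spec : Claim_equal_part1 := by
  intro id_list _
  show part1 id_list = part1_alt id_list
  simp only [part1, part1_alt, outer_fold]
  ring
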